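-- pv_equiv track=rewrite | github.com/theSquaredError/reactree_webshop | reactree/src/wah/wah_utils.py | merge_obs_list
-- ===== SOURCE A (Python) =====
-- from collections import defaultdict
--
-- def merge_obs_list(obs_sim_list, name_id_dict_sim2nl):
--     obs_nl_summary = defaultdict(list)
--
--     for sim_name, sim_id in obs_sim_list:
--         if (sim_name, sim_id) in name_id_dict_sim2nl:
--             natural_name, natural_id = name_id_dict_sim2nl[(sim_name, sim_id)]
--             obs_nl_summary[natural_name].append(natural_id)
--
--     result_str = []
--     for name, ids in sorted(obs_nl_summary.items()):
--         ids_sorted = sorted(set(ids))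
--         id_str = ', '.join(str(id) for id in ids_sorted)
--         result_str.append(f'{name} ({id_str})')
--         # result_str.append(f'{name} {id_str}')
--     return ', '.join(result_str)
-- ===== SOURCE B (Python) =====
-- def merge_obs_list(obs_sim_list, name_id_dict_sim2nl):
--     # dedupe the surviving (natural_name, natural_id) pairs once, sort them
--     # lexicographically, then emit each run of equal names in a single pass.
--     uniq = {name_id_dict_sim2nl[key] for key in obs_sim_list if key in name_id_dict_sim2nl}
--     pairs = sorted(uniq)
--     parts = []
--     while pairs:
--         name = pairs[0][0]
--         k = 1
--         while k < len(pairs) and pairs[k][0] == name: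
--             k += 1
--         id_str = ', '.join(str(i) for _, i in pairs[:k])
--         parts.append(f'{name} ({id_str})')
--         pairs = pairs[k:]
--     return ', '.join(parts)
-- ===== Notes on version B (the rewrite author's own statement) =====
-- stated objective: alternative
-- what changed: Instead of aggregating ids into a defaultdict keyed by name and then sorting the items and each name's deduplicated id list separately, B dedupes the surviving (name, id) pairs once as a set, sorts them lexicographically in one global sort, and emits the summary in a single linear pass over runs of equal names.
import Mathlib
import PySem

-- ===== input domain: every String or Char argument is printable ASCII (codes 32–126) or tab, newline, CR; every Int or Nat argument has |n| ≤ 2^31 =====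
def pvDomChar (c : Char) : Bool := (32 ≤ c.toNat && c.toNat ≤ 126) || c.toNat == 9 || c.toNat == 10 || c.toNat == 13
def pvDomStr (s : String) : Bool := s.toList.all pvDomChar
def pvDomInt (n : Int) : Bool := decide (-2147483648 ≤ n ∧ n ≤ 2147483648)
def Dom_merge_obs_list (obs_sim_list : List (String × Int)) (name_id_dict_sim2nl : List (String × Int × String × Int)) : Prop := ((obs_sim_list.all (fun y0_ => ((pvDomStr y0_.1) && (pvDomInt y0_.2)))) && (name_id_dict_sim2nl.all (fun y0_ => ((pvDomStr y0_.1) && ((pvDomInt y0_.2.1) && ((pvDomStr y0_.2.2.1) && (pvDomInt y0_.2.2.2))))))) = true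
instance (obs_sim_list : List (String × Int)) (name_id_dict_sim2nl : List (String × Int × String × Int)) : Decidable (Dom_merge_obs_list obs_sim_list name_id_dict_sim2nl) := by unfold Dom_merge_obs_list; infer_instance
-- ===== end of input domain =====

-- B dedupes the surviving (name, id) pairs once, sorts them lexicographically in ONE
-- global sort and emits runs of equal names in a single pass, instead of A's
-- defaultdict aggregation followed by sorting the items and each id list separately
-- (alternative decomposition, same asymptotic cost). Neither version mutates its arguments.

-- shared input decoding: the Python dict parameter as a first-match lookup table
def pvDict (name_id_dict_sim2nl : List (String × Int × String × Int)) :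
    PySem.Dict (String × Int) (String × Int) :=
  PySem.Dict.mk (name_id_dict_sim2nl.map (fun e => ((e.1, e.2.1), (e.2.2.1, e.2.2.2))))

-- ===== PORT A =====
def merge_obs_list (obs_sim_list : List (String × Int))
    (name_id_dict_sim2nl : List (String × Int × String × Int)) : String :=
  let d := pvDict name_id_dict_sim2nl
  let obs_nl_summary : PySem.Dict String (List Int) :=
    obs_sim_list.foldl (fun s p =>
      match d.get? p with                       -- 'if key in dict: name, id = dict[key]'
      | some nat => s.modify nat.1 [] (fun l => l ++ [nat.2])   -- defaultdict(list) append
      | none => s) PySem.Dict.empty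
  -- sorted(obs_nl_summary.items()): keys are unique, so Python's tuple sort is the sort by key
  let result_str : List String :=
    (PySem.List.sorted obs_nl_summary.items (fun it => it.1) false).foldl (fun acc it =>
      let ids_sorted := PySem.List.sorted (PySem.Set.ofList it.2) (fun x => x) false
      let id_str := PySem.Str.join ", " (ids_sorted.map (fun i => PySem.Int.toStr i))
      acc ++ [it.1 ++ " (" ++ id_str ++ ")"]) []
  PySem.Str.join ", " result_str

-- ===== PORT B =====
-- the outer while loop of Source B: emit one formatted part per run of equal names
def pvEmit : List (String × Int) → List String
  | [] => []
  | p :: rest =>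
      let same := rest.takeWhile (fun q => q.1 == p.1)     -- pairs[:k]
      let id_str := PySem.Str.join ", " ((p :: same).map (fun q => PySem.Int.toStr q.2))
      (p.1 ++ " (" ++ id_str ++ ")") :: pvEmit (rest.dropWhile (fun q => q.1 == p.1))  -- pairs[k:]
termination_by l => l.length
decreasing_by
  simp only [List.length_cons]
  exact Nat.lt_succ_of_le (List.length_dropWhile_le _ _)

def merge_obs_list_alt (obs_sim_list : List (String × Int))
    (name_id_dict_sim2nl : List (String × Int × String × Int)) : String :=
  let d := pvDict name_id_dict_sim2nl
  let uniq := PySem.Set.ofList (obs_sim_list.filterMap (fun key => d.get? key))  -- set comprehension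
  let pairs := PySem.List.sorted2 uniq (fun q => q.1) (fun q => q.2) false       -- sorted(uniq): tuple order
  PySem.Str.join ", " (pvEmit pairs)

-- ===== PRECONDITION & SPEC =====
def Spec_merge_obs_list (obs_sim_list : List (String × Int)) (name_id_dict_sim2nl : List (String × Int × String × Int)) (out : String) : Prop := out = merge_obs_list_alt obs_sim_list name_id_dict_sim2nl
instance (obs_sim_list : List (String × Int)) (name_id_dict_sim2nl : List (String × Int × String × Int)) (out : String) : Decidable (Spec_merge_obs_list obs_sim_list name_id_dict_sim2nl out) := by unfold Spec_merge_obs_list; infer_instance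

-- ===== CLAIM (what is proved, stated in full; the proofs are below) =====
def Claim_equal_merge_obs_list : Prop := ∀ (obs_sim_list : List (String × Int)) (name_id_dict_sim2nl : List (String × Int × String × Int)), Dom_merge_obs_list obs_sim_list name_id_dict_sim2nl → Spec_merge_obs_list obs_sim_list name_id_dict_sim2nl (merge_obs_list obs_sim_list name_id_dict_sim2nl)

-- ===== LEMMAS AND PROOFS =====

-- the surviving (natural_name, natural_id) pairs, in observation order
def pvS (obs_sim_list : List (String × Int))
    (name_id_dict_sim2nl : List (String × Int × String × Int)) : List (String × Int) :=
  obs_sim_list.filterMap (fun p => (pvDict name_id_dict_sim2nl).get? p)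

def pvIds (S : List (String × Int)) (n : String) : List Int :=
  (S.filter (fun p => p.1 == n)).map (fun p => p.2)

def pvSIds (S : List (String × Int)) (n : String) : List Int :=
  PySem.List.sorted (PySem.Set.ofList (pvIds S n)) (fun x => x) false

def pvNames (S : List (String × Int)) : List String :=
  PySem.List.sorted (PySem.Set.ofList (S.map (fun p => p.1))) (fun x => x) false

def pvFmt (n : String) (ids : List Int) : String :=
  n ++ " (" ++ PySem.Str.join ", " (ids.map (fun i => PySem.Int.toStr i)) ++ ")"

def pvT (S : List (String × Int)) : List (String × Int) :=
  (pvNames S).flatMap (fun n => (pvSIds S n).map (fun i => (n, i)))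

-- A's filtering loop is the plain aggregation loop over the surviving pairs
theorem pv_foldA (g : (String × Int) → Option (String × Int)) (obs : List (String × Int)) :
    ∀ d : PySem.Dict String (List Int),
      obs.foldl (fun s p =>
        match g p with
        | some nat => s.modify nat.1 [] (fun l => l ++ [nat.2])
        | none => s) d
      = (obs.filterMap g).foldl (fun s q => s.modify q.1 [] (fun l => l ++ [q.2])) d := by
  induction obs with
  | nil => intro d; rfl
  | cons p rest ih =>
      intro d
      cases h : g p <;> simp [h, ih]

theorem pv_itemsA (S : List (String × Int)) :
    (S.foldl (fun s q => s.modify q.1 [] (fun l => l ++ [q.2]))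
      (PySem.Dict.empty : PySem.Dict String (List Int))).items
    = (PySem.Set.ofList (S.map (fun p => p.1))).map (fun n => (n, pvIds S n)) := by
  have hk : (S.foldl (fun s q => s.modify q.1 [] (fun l => l ++ [q.2]))
      (PySem.Dict.empty : PySem.Dict String (List Int))).keys
      = PySem.Set.ofList (S.map (fun p => p.1)) :=
    PySem.Dict.keys_foldl_modify_key S (fun q => q.1) [] (fun _ q => fun l => l ++ [q.2])
      PySem.Dict.empty
  have hnd : (S.foldl (fun s q => s.modify q.1 [] (fun l => l ++ [q.2]))
      (PySem.Dict.empty : PySem.Dict String (List Int))).keys.Nodup :=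
    PySem.Dict.nodup_keys_foldl_modify_key S (fun q => q.1) [] (fun _ q => fun l => l ++ [q.2])
      PySem.Dict.empty List.nodup_nil
  rw [PySem.Dict.items_eq_map_keys _ hnd [], hk]
  refine List.map_congr_left ?_
  intro n _
  have := PySem.Dict.getD_foldl_modify_append S
    (PySem.Dict.empty : PySem.Dict String (List Int)) n
  simp [this, pvIds]

theorem pv_sortedItemsA (S : List (String × Int)) :
    PySem.List.sorted ((PySem.Set.ofList (S.map (fun p => p.1))).map (fun n => (n, pvIds S n)))
      (fun it => it.1) false
    = (pvNames S).map (fun n => (n, pvIds S n)) := by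
  apply PySem.List.sorted_eq_of_perm_of_pairwise_lt
  · exact (PySem.List.sorted_perm _ _ _).map _
  · have hp := PySem.List.sorted_ofList_pairwise_lt (S.map (fun p => p.1))
    exact List.pairwise_map.mpr hp

theorem pv_LA (obs_sim_list : List (String × Int))
    (name_id_dict_sim2nl : List (String × Int × String × Int)) :
    merge_obs_list obs_sim_list name_id_dict_sim2nl
    = PySem.Str.join ", " ((pvNames (pvS obs_sim_list name_id_dict_sim2nl)).map
        (fun n => pvFmt n (pvSIds (pvS obs_sim_list name_id_dict_sim2nl) n))) := by
  unfold merge_obs_list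
  simp only [pv_foldA, pv_itemsA, pv_sortedItemsA, PySem.List.foldl_append_singleton_eq_map]
  simp [pvFmt, pvSIds, pvS, List.map_map, Function.comp_def]

-- sorted2 with two keys is the single sort by the lexicographic key
theorem pv_sorted2_lex {α κ₁ κ₂ : Type} [LinearOrder κ₁] [LinearOrder κ₂]
    (xs : List α) (k1 : α → κ₁) (k2 : α → κ₂) :
    PySem.List.sorted2 xs k1 k2 false
    = PySem.List.sorted xs (fun x => toLex (k1 x, k2 x)) false := by
  unfold PySem.List.sorted2 PySem.List.sorted
  simp only [Bool.false_eq_true, ite_false]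
  congr 1
  funext acc x
  congr 1
  funext a b
  simp only [Prod.Lex.lt_iff, ofLex_toLex]
  rcases lt_trichotomy (k1 a) (k1 b) with h | h | h
  · simp [h, lt_asymm h]
  · simp [h]
  · simp [h, lt_asymm h, ne_of_gt h]

theorem pv_mem_pvT (S : List (String × Int)) (z : String × Int) :
    z ∈ pvT S ↔ z ∈ S := by
  constructor
  · intro hz
    simp only [pvT, List.mem_flatMap, List.mem_map] at hz
    obtain ⟨n, _, i, hi, rfl⟩ := hz
    simp only [pvSIds, PySem.List.mem_sorted, PySem.Set.mem_ofList, pvIds,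
      List.mem_map, List.mem_filter] at hi
    obtain ⟨p, ⟨hp, hp1⟩, rfl⟩ := hi
    have h1 : p.1 = n := by simpa using hp1
    rw [← h1]
    exact hp
  · intro hz
    simp only [pvT, List.mem_flatMap, List.mem_map]
    refine ⟨z.1, ?_, z.2, ?_, rfl⟩
    · simp only [pvNames, PySem.List.mem_sorted, PySem.Set.mem_ofList, List.mem_map]
      exact ⟨z, hz, rfl⟩
    · simp only [pvSIds, PySem.List.mem_sorted, PySem.Set.mem_ofList, pvIds,
        List.mem_map, List.mem_filter]
      exact ⟨z, ⟨hz, by simp⟩, rfl⟩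

theorem pv_pairwiseT (S : List (String × Int)) :
    (pvT S).Pairwise (fun a b => toLex (a.1, a.2) < toLex (b.1, b.2)) := by
  rw [pvT, List.pairwise_flatMap]
  constructor
  · intro n _
    have hp := PySem.List.sorted_ofList_pairwise_lt (pvIds S n)
    refine List.pairwise_map.mpr (hp.imp ?_)
    intro i j hij
    simp [Prod.Lex.lt_iff, hij]
  · have hp := PySem.List.sorted_ofList_pairwise_lt (S.map (fun p => p.1))
    refine hp.imp ?_
    intro a b hab x hx y hy
    simp only [List.mem_map] at hx hy
    obtain ⟨i, _, rfl⟩ := hx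
    obtain ⟨j, _, rfl⟩ := hy
    simp [Prod.Lex.lt_iff, hab]

theorem pv_nodupT (S : List (String × Int)) : (pvT S).Nodup := by
  refine (pv_pairwiseT S).imp ?_
  intro a b h
  rintro rfl
  exact lt_irrefl _ h

theorem pv_sortedPairs (S : List (String × Int)) :
    PySem.List.sorted2 (PySem.Set.ofList S) (fun q => q.1) (fun q => q.2) false = pvT S := by
  rw [pv_sorted2_lex]
  apply PySem.List.sorted_eq_of_perm_of_pairwise_lt
  · exact (List.perm_ext_iff_of_nodup (pv_nodupT S) (PySem.Set.nodup_ofList S)).mpr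
      (fun z => by rw [pv_mem_pvT, PySem.Set.mem_ofList])
  · exact pv_pairwiseT S

theorem pv_takeWhile_all {α : Type} (p : α → Bool) (l : List α) (h : ∀ x ∈ l, p x = true) :
    l.takeWhile p = l := by
  induction l with
  | nil => rfl
  | cons x xs ih => simp [h x (by simp), ih (fun y hy => h y (by simp [hy]))]

theorem pv_takeWhile_none {α : Type} (p : α → Bool) (l : List α) (h : ∀ x ∈ l, p x = false) :
    l.takeWhile p = [] := by
  cases l with
  | nil => rfl
  | cons x xs => simp [h x (by simp)]

theorem pv_dropWhile_all {α : Type} (p : α → Bool) (l : List α) (h : ∀ x ∈ l, p x = true) :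
    l.dropWhile p = [] := by
  induction l with
  | nil => rfl
  | cons x xs ih => simp [h x (by simp), ih (fun y hy => h y (by simp [hy]))]

theorem pv_dropWhile_none {α : Type} (p : α → Bool) (l : List α) (h : ∀ x ∈ l, p x = false) :
    l.dropWhile p = l := by
  cases l with
  | nil => rfl
  | cons x xs => simp [h x (by simp)]

theorem pv_emit (L : List String) (B : String → List Int)
    (hL : L.Pairwise (· < ·)) (hB : ∀ n ∈ L, B n ≠ []) :
    pvEmit (L.flatMap (fun n => (B n).map (fun i => (n, i))))
    = L.map (fun n => pvFmt n (B n)) := by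
  induction L with
  | nil => simp [pvEmit]
  | cons n L' ih =>
      obtain ⟨i0, is, hBn⟩ := List.exists_cons_of_ne_nil (hB n (by simp))
      have hrest : ∀ x ∈ L'.flatMap (fun m => (B m).map fun i => (m, i)),
          (x.1 == n) = false := by
        intro x hx
        simp only [List.mem_flatMap, List.mem_map] at hx
        obtain ⟨m, hm, i, _, rfl⟩ := hx
        have : n < m := (List.pairwise_cons.mp hL).1 m hm
        simp [ne_of_gt this]
      have hsame : ∀ x ∈ is.map (fun i => (n, i)), ((x : String × Int).1 == n) = true := by
        intro x hx
        simp only [List.mem_map] at hx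
        obtain ⟨i, _, rfl⟩ := hx
        simp
      simp only [List.flatMap_cons, hBn, List.map_cons, List.cons_append]
      rw [pvEmit]
      have h1 : (is.map (fun i => (n, i)) ++ L'.flatMap (fun m => (B m).map fun i => (m, i))).takeWhile
          (fun q => q.1 == n) = is.map (fun i => (n, i)) := by
        rw [List.takeWhile_append, pv_takeWhile_all _ _ hsame, if_pos rfl,
          pv_takeWhile_none _ _ hrest, List.append_nil]
      have h2 : (is.map (fun i => (n, i)) ++ L'.flatMap (fun m => (B m).map fun i => (m, i))).dropWhile
          (fun q => q.1 == n) = L'.flatMap (fun m => (B m).map fun i => (m, i)) := by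
        rw [List.dropWhile_append, pv_dropWhile_all _ _ hsame]
        simp [pv_dropWhile_none _ _ hrest]
      simp only [h1, h2]
      rw [ih (List.pairwise_cons.mp hL).2 (fun m hm => hB m (by simp [hm]))]
      simp [pvFmt, List.map_map, Function.comp_def]

theorem pv_SIds_ne_nil (S : List (String × Int)) (n : String) (hn : n ∈ pvNames S) :
    pvSIds S n ≠ [] := by
  simp only [pvNames, PySem.List.mem_sorted, PySem.Set.mem_ofList, List.mem_map] at hn
  obtain ⟨p, hp, rfl⟩ := hn
  have : p.2 ∈ pvSIds S p.1 := by
    simp only [pvSIds, PySem.List.mem_sorted, PySem.Set.mem_ofList, pvIds,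
      List.mem_map, List.mem_filter]
    exact ⟨p, ⟨hp, by simp⟩, rfl⟩
  exact List.ne_nil_of_mem this

theorem pv_LB (obs_sim_list : List (String × Int))
    (name_id_dict_sim2nl : List (String × Int × String × Int)) :
    merge_obs_list_alt obs_sim_list name_id_dict_sim2nl
    = PySem.Str.join ", " ((pvNames (pvS obs_sim_list name_id_dict_sim2nl)).map
        (fun n => pvFmt n (pvSIds (pvS obs_sim_list name_id_dict_sim2nl) n))) := by
  unfold merge_obs_list_alt
  have hS : obs_sim_list.filterMap (fun key => (pvDict name_id_dict_sim2nl).get? key)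
      = pvS obs_sim_list name_id_dict_sim2nl := rfl
  simp only [hS, pv_sortedPairs, pvT]
  rw [pv_emit (pvNames (pvS obs_sim_list name_id_dict_sim2nl)) _
    (by unfold pvNames; exact PySem.List.sorted_ofList_pairwise_lt _)
    (pv_SIds_ne_nil (pvS obs_sim_list name_id_dict_sim2nl))]

-- ===== VERDICT (by name: the statement is the Claim_ definition above) =====
theorem merge_obs_list_spec : Claim_equal_merge_obs_list := by
  intro obs_sim_list name_id_dict_sim2nl _
  unfold Spec_merge_obs_list
  rw [pv_LA, pv_LB]
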